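-- pv_equiv track=rewrite | github.com/Xujia118/INFO6205 | Assignment4/study_recursion.py | asis_recursive
-- ===== SOURCE A (Python) =====
-- from collections import deque
--
-- def asis_recursive(n, result=0):
--     def helper(n, s):
--         if n == 0:
--             return s
--
--         s.append(n % 10)
--         return helper(n // 10, s)
--
--     s = []
--     digits_holder = helper(n, s)
--     digits_holder = deque(digits_holder)
--
--     result = 0
--     i = 0
--     while digits_holder:
--         result += digits_holder.popleft() * 10 ** i
--         i += 1
--     return result
-- ===== SOURCE B (Python) =====
-- def asis_recursive(n, result=0):
--     # Single-pass recursion: rebuild the value directly from n % 10 and the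
--     # reconstruction of n // 10, with no intermediate list or deque.
--     def rebuild(n):
--         if n == 0:
--             return 0
--         return n % 10 + 10 * rebuild(n // 10)
--
--     return rebuild(n)
-- ===== Notes on version B (the rewrite author's own statement) =====
-- stated objective: simpler
-- what changed: Replaces A's two-phase scheme (recursively append digits to a list, wrap it in a deque, then a while loop with popleft and 10**i to reconstruct) with one direct recursion n % 10 + 10 * rebuild(n // 10), eliminating the list, the deque and the reconstruction loop.
import Mathlib
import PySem

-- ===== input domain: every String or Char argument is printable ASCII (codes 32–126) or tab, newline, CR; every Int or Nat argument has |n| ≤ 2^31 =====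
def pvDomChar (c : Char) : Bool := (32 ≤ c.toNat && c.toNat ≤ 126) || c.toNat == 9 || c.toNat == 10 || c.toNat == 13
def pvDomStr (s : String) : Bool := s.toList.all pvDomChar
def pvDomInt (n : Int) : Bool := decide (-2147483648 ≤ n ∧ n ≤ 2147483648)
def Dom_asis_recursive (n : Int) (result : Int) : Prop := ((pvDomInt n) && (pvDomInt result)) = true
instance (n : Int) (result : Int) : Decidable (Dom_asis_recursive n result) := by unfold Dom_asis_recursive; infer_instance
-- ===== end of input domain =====

-- B replaces A's digit list + deque reconstruction loop by one direct recursion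
-- n % 10 + 10 * rebuild(n // 10) (objective: simpler). Return-value equivalence on 0 ≤ n.

-- ===== PORT A =====
-- A's inner helper: appends n % 10 and recurses on n // 10. Python diverges
-- (RecursionError) for n < 0; the fuel only makes the same recursion total —
-- Pre_ restricts to 0 ≤ n, where the fuel n.natAbs + 1 is never exhausted.
def asisHelperA (fuel : Nat) (n : Int) (s : List Int) : List Int :=
  match fuel with
  | 0 => s
  | fuel + 1 =>
    if n = 0 then s
    else asisHelperA fuel (PySem.Int.floordiv n 10) (s ++ [PySem.Int.mod n 10])

def asis_recursive (n : Int) (result : Int) : Int :=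
  let s : List Int := []
  let digits_holder := asisHelperA (n.natAbs + 1) n s
  -- while digits_holder: result += popleft * 10 ** i; i += 1
  (digits_holder.foldl (fun (p : Int × Nat) d => (p.1 + d * 10 ^ p.2, p.2 + 1)) (0, 0)).1

-- ===== PORT B =====
-- B's rebuild: one direct recursion, no containers (same fuel-totalisation).
def asisRebuildB (fuel : Nat) (n : Int) : Int :=
  match fuel with
  | 0 => 0
  | fuel + 1 =>
    if n = 0 then 0
    else PySem.Int.mod n 10 + 10 * asisRebuildB fuel (PySem.Int.floordiv n 10)

def asis_recursive_alt (n : Int) (result : Int) : Int :=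
  asisRebuildB (n.natAbs + 1) n

-- ===== PRECONDITION & SPEC =====
-- Pre_ excludes n < 0, on which the Python A never returns (its helper recurses
-- on n // 10 forever and raises RecursionError); B raises there too.
def Pre_asis_recursive (n : Int) (result : Int) : Prop := 0 ≤ n
instance (n : Int) (result : Int) : Decidable (Pre_asis_recursive n result) := by unfold Pre_asis_recursive; infer_instance
def pvWitness_asis_recursive : Int × Int := (123, 0)
def Spec_asis_recursive (n : Int) (result : Int) (out : Int) : Prop := out = asis_recursive_alt n result
instance (n : Int) (result : Int) (out : Int) : Decidable (Spec_asis_recursive n result out) := by unfold Spec_asis_recursive; infer_instance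

-- ===== CLAIM (what is proved, stated in full; the proofs are below) =====
def Claim_equal_asis_recursive : Prop := ∀ (n : Int) (result : Int), Dom_asis_recursive n result → Pre_asis_recursive n result → Spec_asis_recursive n result (asis_recursive n result)

-- ===== LEMMAS AND PROOFS =====

-- Both ports compute n (for 0 ≤ n ≤ fuel); we prove each equals n.

theorem asisRebuildB_eq (fuel : Nat) (n : Int) (h0 : 0 ≤ n) (hf : n ≤ fuel) :
    asisRebuildB fuel n = n := by
  induction fuel generalizing n with
  | zero => simp [asisRebuildB]; omega
  | succ f ih =>
    rw [asisRebuildB]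
    by_cases hz : n = 0
    · simp [hz]
    · rw [if_neg hz,
        PySem.Int.mod_eq_emod_of_pos (by norm_num : (0:Int) < 10),
        PySem.Int.floordiv_eq_ediv_of_pos (by norm_num : (0:Int) < 10),
        ih (n / 10) (by omega) (by omega)]
      omega

-- helperA appends the digit list built from n.
theorem asisHelperA_append (fuel : Nat) (n : Int) (s : List Int) :
    asisHelperA fuel n s = s ++ asisHelperA fuel n [] := by
  induction fuel generalizing n s with
  | zero => simp [asisHelperA]
  | succ f ih =>
    rw [asisHelperA, asisHelperA]
    by_cases hz : n = 0
    · simp [hz]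
    · rw [if_neg hz, if_neg hz, ih _ (s ++ [PySem.Int.mod n 10]),
        ih _ ([] ++ [PySem.Int.mod n 10])]
      simp

-- Reconstruction invariant: folding A's loop over the digits of n from state
-- (r, i) yields value r + n * 10 ^ i.
theorem asisFold_eq (fuel : Nat) (n : Int) (h0 : 0 ≤ n) (hf : n ≤ fuel) (r : Int) (i : Nat) :
    (asisHelperA fuel n []).foldl
      (fun (p : Int × Nat) d => (p.1 + d * 10 ^ p.2, p.2 + 1)) (r, i)
      = (r + n * 10 ^ i, i + (asisHelperA fuel n []).length) := by
  induction fuel generalizing n r i with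
  | zero =>
    have : n = 0 := by omega
    simp [asisHelperA, this]
  | succ f ih =>
    rw [asisHelperA]
    by_cases hz : n = 0
    · simp [hz]
    · rw [if_neg hz, asisHelperA_append]
      simp only [List.nil_append, List.singleton_append, List.foldl_cons]
      rw [PySem.Int.mod_eq_emod_of_pos (by norm_num : (0:Int) < 10),
        PySem.Int.floordiv_eq_ediv_of_pos (by norm_num : (0:Int) < 10),
        ih (n / 10) (by omega) (by omega)]
      have hrec : r + n % 10 * 10 ^ i + n / 10 * 10 ^ (i + 1) = r + n * 10 ^ i := by
        have hd : n % 10 + 10 * (n / 10) = n := Int.emod_add_ediv n 10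
        rw [pow_succ]; linear_combination (10:Int) ^ i * hd
      simp [hrec]
      omega

-- ===== VERDICT (by name: the statement is the Claim_ definition above) =====
theorem asis_recursive_spec : Claim_equal_asis_recursive := by
  intro n result _ hpre
  unfold Spec_asis_recursive asis_recursive asis_recursive_alt
  have hf : n ≤ (n.natAbs + 1 : Nat) := by omega
  show ((asisHelperA (n.natAbs + 1) n []).foldl
      (fun (p : Int × Nat) d => (p.1 + d * 10 ^ p.2, p.2 + 1)) (0, 0)).1
    = asisRebuildB (n.natAbs + 1) n
  rw [asisFold_eq _ _ hpre hf, asisRebuildB_eq _ _ hpre hf]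
  simp
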